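-- pv_equiv track=rewrite | github.com/SeisComP3/seiscomp3 | src/system/libs/python/seiscomp3/Shell.py | convert_wildcard
-- ===== SOURCE A (Python) =====
-- def convert_wildcard(s):
--     wild = s.split(".")
--     if len(wild) > 2:
--         raise Exception("station selector: only one dot allowed")
--
--     # Add station wildcard if only network is given
--     if len(wild) == 1:
--         wild.append('*')
--     for i in range(len(wild)):
--         if len(wild[i]) == 0:
--             wild[i] = '*'
--     return '_'.join(wild)
-- ===== SOURCE B (Python) =====
-- def convert_wildcard(s):
--     # Single left-to-right scan building the output directly: '.' becomes '_',
--     # an empty segment gets a '*' inserted, a second '.' raises.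
--     out = []
--     seg_len = 0
--     seen_dot = False
--     for c in s:
--         if c == '.':
--             if seen_dot:
--                 raise Exception("station selector: only one dot allowed")
--             if seg_len == 0:
--                 out.append('*')
--             out.append('_')
--             seen_dot = True
--             seg_len = 0
--         else:
--             out.append(c)
--             seg_len += 1
--     if seg_len == 0:
--         out.append('*')
--     if not seen_dot:
--         out.append('_')
--         out.append('*')
--     return ''.join(out)
-- ===== Notes on version B (the rewrite author's own statement) =====
-- stated objective: alternative
-- what changed: Replaces split-into-list, conditional append and per-element fixup loop with a single character-by-character state machine that emits the result directly, tracking current-segment length and whether a dot was seen.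
import Mathlib
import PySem

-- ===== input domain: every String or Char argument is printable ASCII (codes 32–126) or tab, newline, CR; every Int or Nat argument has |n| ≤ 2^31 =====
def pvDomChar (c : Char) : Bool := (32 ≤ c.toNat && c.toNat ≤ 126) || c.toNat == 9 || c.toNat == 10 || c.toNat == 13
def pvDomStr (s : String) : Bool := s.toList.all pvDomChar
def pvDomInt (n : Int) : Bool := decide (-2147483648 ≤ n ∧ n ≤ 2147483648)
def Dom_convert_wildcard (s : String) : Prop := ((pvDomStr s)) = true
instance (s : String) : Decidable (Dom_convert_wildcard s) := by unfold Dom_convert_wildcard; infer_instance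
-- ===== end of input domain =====

-- B replaces A's split-into-list / conditional-append / fixup-loop with a single character
-- state machine that emits the result directly (objective: alternative).
-- A raises on more than one dot; Pre_ excludes exactly that.

-- ===== PORT A =====
def convert_wildcard (s : String) : String :=
  let wild := (PySem.Chars.splitOn s.toList ['.']).map String.ofList   -- s.split(".")
  if wild.length > 2 then ""                                           -- raise path, excluded by Pre_
  else
    let wild := if wild.length = 1 then wild ++ ["*"] else wild        -- append station wildcard
    let wild := wild.map (fun w => if PySem.Str.len w = 0 then "*" else w)  -- the fixup loop
    PySem.Str.join "_" wild

-- ===== PORT B =====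
-- the for-loop of Source B: state = (out, seg_len, seen_dot); none = the raise path
def bLoop : List Char → List Char → Nat → Bool → Option (List Char × Nat × Bool)
  | [], out, segLen, seenDot => some (out, segLen, seenDot)
  | c :: r, out, segLen, seenDot =>
    if c = '.' then
      if seenDot then none                                             -- raise, excluded by Pre_
      else bLoop r (out ++ (if segLen = 0 then ['*', '_'] else ['_'])) 0 true
    else bLoop r (out ++ [c]) (segLen + 1) seenDot

def convert_wildcard_alt (s : String) : String :=
  match bLoop s.toList [] 0 false with
  | none => ""                                                         -- raise path, excluded by Pre_
  | some (out, segLen, seenDot) =>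
    let out := if segLen = 0 then out ++ ['*'] else out
    let out := if seenDot then out else out ++ ['_', '*']
    String.ofList out

-- ===== PRECONDITION & SPEC =====
-- A raises an Exception (only one dot allowed in a station selector) when s contains more than
-- one dot character; exactly those inputs are excluded.
def Pre_convert_wildcard (s : String) : Prop := s.toList.count '.' ≤ 1
instance (s : String) : Decidable (Pre_convert_wildcard s) := by unfold Pre_convert_wildcard; infer_instance
def pvWitness_convert_wildcard : String := "GE.APE"

def Spec_convert_wildcard (s : String) (out : String) : Prop := out = convert_wildcard_alt s
instance (s : String) (out : String) : Decidable (Spec_convert_wildcard s out) := by unfold Spec_convert_wildcard; infer_instance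

-- ===== CLAIM (what is proved, stated in full; the proofs are below) =====
def Claim_equal_convert_wildcard : Prop := ∀ (s : String), Dom_convert_wildcard s → Pre_convert_wildcard s → Spec_convert_wildcard s (convert_wildcard s)

-- ===== LEMMAS AND PROOFS =====

-- a fuel-free reading of Chars.splitOn on the one-char separator ['.']
def pvSplitDot : List Char → List Char → List (List Char)
  | pre, [] => [pre]
  | pre, c :: r => if c = '.' then pre :: pvSplitDot [] r else pvSplitDot (pre ++ [c]) r

-- partition at the first dot (proof helper characterising both programs)
def pvPartitionDot : List Char → List Char × List Char
  | [] => ([], [])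
  | c :: r => if c = '.' then ([], r) else
      let p := pvPartitionDot r
      (c :: p.1, p.2)

theorem pv_go_dot : ∀ (l : List Char) (fuel : Nat) (cur : List Char) (acc : List (List Char)),
    l.length ≤ fuel →
    PySem.Chars.splitOn.go ['.'] fuel l cur acc = acc.reverse ++ pvSplitDot cur.reverse l := by
  intro l
  induction l with
  | nil =>
    intro fuel cur acc _
    cases fuel <;> simp [PySem.Chars.splitOn.go, pvSplitDot]
  | cons c r ih =>
    intro fuel cur acc hf
    cases fuel with
    | zero => simp at hf
    | succ f =>
      have hr : r.length ≤ f := by simpa using hf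
      by_cases hc : c = '.'
      · subst hc
        rw [PySem.Chars.splitOn.go]
        simp only [List.isPrefixOf, BEq.rfl, Bool.true_and, if_true,
          List.length_singleton, List.drop_succ_cons, List.drop_zero]
        rw [ih f [] (cur.reverse :: acc) hr]
        simp [pvSplitDot]
      · rw [PySem.Chars.splitOn.go]
        have hpre : List.isPrefixOf ['.'] (c :: r) = false := by
          simp [List.isPrefixOf]
          exact fun h => (hc h.symm).elim
        simp only [hpre, if_neg, Bool.false_eq_true, not_false_eq_true]
        rw [ih f (c :: cur) acc hr]
        simp [pvSplitDot, hc]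

theorem pv_splitOn_dot (cs : List Char) :
    PySem.Chars.splitOn cs ['.'] = pvSplitDot [] cs := by
  rw [PySem.Chars.splitOn, pv_go_dot cs (cs.length + 1) [] [] (by omega)]
  simp

theorem pv_partition_no_dot (r : List Char) (h : '.' ∉ r) : pvPartitionDot r = (r, []) := by
  induction r with
  | nil => rfl
  | cons c t ih =>
    have hc : c ≠ '.' := fun e => h (e ▸ List.mem_cons_self)
    simp only [pvPartitionDot, if_neg hc, ih (fun m => h (List.mem_cons_of_mem _ m))]

-- under the precondition, splitting and partitioning give the same pieces
theorem pv_split_partition : ∀ (cs pre : List Char), cs.count '.' ≤ 1 →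
    pvSplitDot pre cs =
      if '.' ∈ cs then [pre ++ (pvPartitionDot cs).1, (pvPartitionDot cs).2]
      else [pre ++ (pvPartitionDot cs).1] := by
  intro cs
  induction cs with
  | nil => intro pre _; simp [pvSplitDot, pvPartitionDot]
  | cons c r ih =>
    intro pre hcount
    by_cases hc : c = '.'
    · subst hc
      have hr0 : r.count '.' = 0 := by
        simp at hcount; omega
      have hnr : '.' ∉ r := by
        intro hm; rw [← List.count_pos_iff] at hm; omega
      simp only [pvSplitDot, pvPartitionDot]
      rw [ih [] (by omega)]
      simp [hnr, pv_partition_no_dot r hnr]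
    · have hr : r.count '.' ≤ 1 := by
        simp [List.count_cons] at hcount ⊢; omega
      simp only [pvSplitDot, if_neg hc, pvPartitionDot]
      rw [ih (pre ++ [c]) hr]
      have hmem : ('.' ∈ c :: r) = ('.' ∈ r) := by
        simp [List.mem_cons, Ne.symm hc]
      by_cases hm : '.' ∈ r <;> simp [hm, Ne.symm hc]

theorem pv_join2 (x y : String) : PySem.Str.join "_" [x, y] = x ++ "_" ++ y := by
  rw [PySem.Str.join, PySem.Chars.join]
  have h1 : "_".toList.intercalate (List.map String.toList [x, y])
      = x.toList ++ ("_".toList ++ y.toList) := by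
    simp [List.intercalate]
  rw [h1, String.ofList_append, String.ofList_append, String.ofList_toList,
      String.ofList_toList, String.ofList_toList, String.append_assoc]

theorem pv_lenOf (x : List Char) : PySem.Str.len (String.ofList x) = x.length := by
  simp [PySem.Str.len]

-- B's loop passes through a dot-free prefix, appending it to the output
theorem pv_bLoop_no_dot : ∀ (p rest out : List Char) (n : Nat) (b : Bool), '.' ∉ p →
    bLoop (p ++ rest) out n b = bLoop rest (out ++ p) (n + p.length) b := by
  intro p
  induction p with
  | nil => intro rest out n b _; simp
  | cons c t ih =>
    intro rest out n b h
    have hc : c ≠ '.' := fun e => h (e ▸ List.mem_cons_self)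
    simp only [List.cons_append, bLoop, if_neg hc]
    rw [ih rest (out ++ [c]) (n + 1) b (fun m => h (List.mem_cons_of_mem _ m))]
    simp only [List.append_assoc, List.singleton_append, List.length_cons]
    ring_nf

theorem pv_bLoop_nil (p out : List Char) (n : Nat) (b : Bool) (h : '.' ∉ p) :
    bLoop p out n b = some (out ++ p, n + p.length, b) := by
  have := pv_bLoop_no_dot p [] out n b h
  simpa [bLoop] using this

-- a dot-containing list with at most one dot decomposes at its first dot
theorem pv_partition_decomp : ∀ (cs : List Char), '.' ∈ cs →
    cs = (pvPartitionDot cs).1 ++ '.' :: (pvPartitionDot cs).2 ∧ '.' ∉ (pvPartitionDot cs).1 := by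
  intro cs
  induction cs with
  | nil => intro h; simp at h
  | cons c r ih =>
    intro h
    by_cases hc : c = '.'
    · subst hc; simp [pvPartitionDot]
    · have hr : '.' ∈ r := by
        rcases List.mem_cons.mp h with h1 | h1
        · exact absurd h1.symm hc
        · exact h1
      obtain ⟨h1, h2⟩ := ih hr
      constructor
      · simp only [pvPartitionDot, if_neg hc]
        exact congrArg (c :: ·) h1
      · simp only [pvPartitionDot, if_neg hc]
        intro hm
        rcases List.mem_cons.mp hm with e | e
        · exact hc e.symm
        · exact h2 e

theorem pv_strcat3 (x y z : List Char) :
    String.ofList x ++ String.ofList y ++ String.ofList z = String.ofList (x ++ y ++ z) := by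
  rw [String.ofList_append, String.ofList_append]

-- ===== VERDICT (by name: the statement is the Claim_ definition above) =====
theorem convert_wildcard_spec : Claim_equal_convert_wildcard := by
  intro s _ hpre
  unfold Pre_convert_wildcard at hpre
  unfold Spec_convert_wildcard convert_wildcard convert_wildcard_alt
  rw [pv_splitOn_dot, pv_split_partition s.toList [] hpre]
  by_cases hm : '.' ∈ s.toList
  · -- exactly one dot: s = p1 ++ '.' :: p2
    obtain ⟨hdec, hp1⟩ := pv_partition_decomp s.toList hm
    set p1 := (pvPartitionDot s.toList).1 with hP1
    set p2 := (pvPartitionDot s.toList).2 with hP2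
    have hp2 : '.' ∉ p2 := by
      intro h2
      have := List.count_pos_iff.mpr h2
      rw [hdec] at hpre
      simp [List.count_append, List.count_eq_zero_of_not_mem hp1] at hpre
      omega
    have hB : bLoop s.toList [] 0 false =
        some ((p1 ++ if p1.length = 0 then ['*', '_'] else ['_']) ++ p2, p2.length, true) := by
      conv_lhs => rw [hdec]
      rw [pv_bLoop_no_dot p1 ('.' :: p2) [] 0 false hp1]
      simp only [List.nil_append, bLoop, if_true, Bool.false_eq_true, if_false, Nat.zero_add]
      rw [pv_bLoop_nil p2 _ 0 true hp2]
      simp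
    rw [if_pos hm, hB]
    simp only [List.nil_append, List.map_cons, List.map_nil, List.length_cons, List.length_nil]
    rw [if_neg (by omega), if_neg (by omega)]
    simp only [List.map_cons, List.map_nil, pv_lenOf]
    rw [pv_join2]
    simp only [Nat.cast_eq_zero]
    show (if p1.length = 0 then String.ofList ['*'] else String.ofList p1) ++ String.ofList ['_'] ++
        (if p2.length = 0 then String.ofList ['*'] else String.ofList p2) = _
    rw [← apply_ite String.ofList, ← apply_ite String.ofList, pv_strcat3]
    refine congrArg String.ofList ?_
    by_cases hA : p1.length = 0 <;> by_cases hBn : p2.length = 0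
    · simp [List.length_eq_zero_iff.mp hA, List.length_eq_zero_iff.mp hBn]
    · simp [hBn, List.length_eq_zero_iff.mp hA]
    · simp [hA, List.length_eq_zero_iff.mp hBn]
    · simp [hA, hBn]
  · -- no dot
    have hpart : pvPartitionDot s.toList = (s.toList, []) := pv_partition_no_dot _ hm
    have hB : bLoop s.toList [] 0 false = some (s.toList, s.toList.length, false) := by
      have := pv_bLoop_no_dot s.toList [] [] 0 false hm
      simpa using this
    rw [if_neg hm, hB, hpart]
    simp only [List.nil_append, List.map_cons, List.map_nil, List.length_cons, List.length_nil]
    rw [if_neg (by omega)]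
    simp only [if_true]
    simp only [List.map_cons, List.map_nil, List.cons_append, List.nil_append, pv_lenOf]
    rw [pv_join2]
    simp only [Nat.cast_eq_zero, ite_self]
    show (if s.toList.length = 0 then String.ofList ['*'] else String.ofList s.toList) ++
        String.ofList ['_'] ++ String.ofList ['*'] = _
    rw [← apply_ite String.ofList, pv_strcat3]
    refine congrArg String.ofList ?_
    by_cases hA : s.toList.length = 0
    · simp [List.length_eq_zero_iff.mp hA]
    · have hs : s ≠ "" := fun e => hA (by simp [e])
      simp [hs]
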